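-- pv_equiv track=rewrite | github.com/healthonrails/annolid | annolid/gui/widgets/labeling_progress_dashboard.py | _merge_annotator_rows
-- ===== SOURCE A (Python) =====
-- from typing import Dict, List, Sequence
--
-- def _merge_annotator_rows(
--     files: Sequence[tuple[str, int]],
--     shapes: Sequence[tuple[str, int]],
-- ) -> List[tuple[str, int, int]]:
--     file_map = {k: int(v) for k, v in files}
--     shape_map = {k: int(v) for k, v in shapes}
--     keys = sorted(set(file_map.keys()) | set(shape_map.keys()))
--     return [(k, file_map.get(k, 0), shape_map.get(k, 0)) for k in keys]
-- ===== SOURCE B (Python) =====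
-- def _merge_annotator_rows(files, shapes):
--     # Maintain the merged output rows sorted by key at all times (ordered
--     # insertion); update a slot in place when the key already exists.
--     rows = []
--
--     def upd(k, tag, v):
--         i = 0
--         while i < len(rows) and rows[i][0] < k:
--             i += 1
--         if i < len(rows) and rows[i][0] == k:
--             r = rows[i]
--             rows[i] = (k, v, r[2]) if tag == 0 else (k, r[1], v)
--         else:
--             rows.insert(i, (k, v, 0) if tag == 0 else (k, 0, v))
--
--     for k, v in files:
--         upd(k, 0, int(v))
--     for k, v in shapes:
--         upd(k, 1, int(v))
--     return rows
-- ===== Notes on version B (the rewrite author's own statement) =====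
-- stated objective: alternative
-- what changed: B uses no dicts, no set union and no final sort: it builds the merged result directly as a list of rows kept sorted by key at all times via ordered insertion (insertion-sort style), updating the file/shape slot in place when a key recurs
import Mathlib
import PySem

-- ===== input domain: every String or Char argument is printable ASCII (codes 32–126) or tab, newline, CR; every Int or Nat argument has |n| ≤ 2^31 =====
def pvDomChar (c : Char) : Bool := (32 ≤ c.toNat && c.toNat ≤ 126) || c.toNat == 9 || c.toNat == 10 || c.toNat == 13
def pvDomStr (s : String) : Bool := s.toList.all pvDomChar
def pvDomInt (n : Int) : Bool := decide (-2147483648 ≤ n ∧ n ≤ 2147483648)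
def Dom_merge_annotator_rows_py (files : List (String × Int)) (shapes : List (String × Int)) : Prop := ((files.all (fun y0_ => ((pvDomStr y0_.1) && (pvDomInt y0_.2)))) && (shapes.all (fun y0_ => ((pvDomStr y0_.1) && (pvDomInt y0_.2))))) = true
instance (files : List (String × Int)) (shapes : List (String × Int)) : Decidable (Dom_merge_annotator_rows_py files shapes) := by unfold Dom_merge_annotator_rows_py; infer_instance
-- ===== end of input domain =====

-- B replaces A's two hash maps + set union + sort by a single list of output rows kept
-- sorted by key at all times via ordered insertion (no dict, no set, no final sort).

-- ===== PORT A =====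
def merge_annotator_rows_py (files : List (String × Int)) (shapes : List (String × Int)) : List (String × Int × Int) :=
  -- file_map = {k: int(v) for k, v in files}  (int(v) on an int is v)
  let file_map : PySem.Dict String Int := files.foldl (fun d p => d.insert p.1 p.2) PySem.Dict.empty
  -- shape_map = {k: int(v) for k, v in shapes}
  let shape_map : PySem.Dict String Int := shapes.foldl (fun d p => d.insert p.1 p.2) PySem.Dict.empty
  -- keys = sorted(set(file_map.keys()) | set(shape_map.keys()))
  let keys := PySem.List.sorted (PySem.Set.union (PySem.Set.ofList file_map.keys) shape_map.keys) (fun x => x) false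
  -- [(k, file_map.get(k, 0), shape_map.get(k, 0)) for k in keys]
  keys.map (fun k => (k, file_map.getD k 0, shape_map.getD k 0))

-- ===== PORT B =====
-- upd(k, tag, v): walk past the rows whose key is < k (the while loop, here structural
-- recursion); then either overwrite slot `tag` of the matching row or insert a fresh row.
def pvUpd (rows : List (String × Int × Int)) (k : String) (tag : Int) (v : Int) : List (String × Int × Int) :=
  match rows with
  | [] => [(k, if tag = 0 then (v, 0) else (0, v))]
  | r :: rest =>
    if k = r.1 then (k, if tag = 0 then (v, r.2.2) else (r.2.1, v)) :: rest
    else if k < r.1 then (k, if tag = 0 then (v, 0) else (0, v)) :: r :: rest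
    else r :: pvUpd rest k tag v

def merge_annotator_rows_py_alt (files : List (String × Int)) (shapes : List (String × Int)) : List (String × Int × Int) :=
  -- for k, v in files: upd(k, 0, int(v))   (int(v) on an int is v)
  let rows1 := files.foldl (fun rows p => pvUpd rows p.1 0 p.2) []
  -- for k, v in shapes: upd(k, 1, int(v))
  shapes.foldl (fun rows p => pvUpd rows p.1 1 p.2) rows1

-- ===== PRECONDITION & SPEC =====
def Spec_merge_annotator_rows_py (files : List (String × Int)) (shapes : List (String × Int)) (out : List (String × Int × Int)) : Prop := out = merge_annotator_rows_py_alt files shapes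
instance (files : List (String × Int)) (shapes : List (String × Int)) (out : List (String × Int × Int)) : Decidable (Spec_merge_annotator_rows_py files shapes out) := by unfold Spec_merge_annotator_rows_py; infer_instance

-- ===== CLAIM (what is proved, stated in full; the proofs are below) =====
def Claim_equal_merge_annotator_rows_py : Prop := ∀ (files : List (String × Int)) (shapes : List (String × Int)), Dom_merge_annotator_rows_py files shapes → Spec_merge_annotator_rows_py files shapes (merge_annotator_rows_py files shapes)

-- ===== LEMMAS AND PROOFS =====

-- Last value paired with key j (0 if j never occurs) — the common abstraction of
-- A's dict overwriting and B's in-place slot update.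
def pvLastF (xs : List (String × Int)) (j : String) : Int :=
  xs.foldl (fun a p => if p.1 = j then p.2 else a) 0

theorem pvLastF_append (xs : List (String × Int)) (k : String) (v : Int) (j : String) :
    pvLastF (xs ++ [(k, v)]) j = if k = j then v else pvLastF xs j := by
  simp [pvLastF, List.foldl_append]

theorem pvLastF_of_not_mem (xs : List (String × Int)) (j : String)
    (h : j ∉ xs.map Prod.fst) : pvLastF xs j = 0 := by
  induction xs using List.reverseRecOn with
  | nil => rfl
  | append_singleton xs p ih =>
      rcases p with ⟨k, v⟩
      rw [pvLastF_append]
      simp only [List.map_append, List.mem_append] at h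
      rcases not_or.mp h with ⟨h1, h2⟩
      have hk : k ≠ j := by simpa [eq_comm] using h2
      simp [hk, ih h1]

-- A's dict lookup is pvLastF (last insertion wins).
theorem pv_getD_foldl_insert (xs : List (String × Int)) (d : PySem.Dict String Int) (j : String) :
    (xs.foldl (fun d p => d.insert p.1 p.2) d).getD j 0
      = xs.foldl (fun a p => if p.1 = j then p.2 else a) (d.getD j 0) := by
  induction xs generalizing d with
  | nil => rfl
  | cons p t ih =>
      simp only [List.foldl_cons, ih, PySem.Dict.getD_insert]
      congr 1
      by_cases hj : p.1 = j
      · simp [hj]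
      · rw [if_neg (fun h => hj h.symm), if_neg hj]

theorem pv_getD_empty_eq_lastF (xs : List (String × Int)) (j : String) :
    (xs.foldl (fun d p => d.insert p.1 p.2) (PySem.Dict.empty : PySem.Dict String Int)).getD j 0
      = pvLastF xs j := by
  rw [pv_getD_foldl_insert]; simp [pvLastF, PySem.Dict.getD_empty]

-- The single-update step of B, against an abstract value function g.
theorem pvUpd_inv (k : String) (tag : Int) (v : Int) (g : String → Int × Int) :
    ∀ rows : List (String × Int × Int),
    rows.Pairwise (fun a b => a.1 < b.1) →
    (∀ p ∈ rows, p.2 = g p.1) →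
    (k ∉ rows.map Prod.fst → g k = (0, 0)) →
    (pvUpd rows k tag v).Pairwise (fun a b => a.1 < b.1) ∧
    (∀ p ∈ pvUpd rows k tag v,
      p.2 = if p.1 = k then (if tag = 0 then (v, (g k).2) else ((g k).1, v)) else g p.1) ∧
    (∀ j, j ∈ (pvUpd rows k tag v).map Prod.fst ↔ j = k ∨ j ∈ rows.map Prod.fst) := by
  intro rows
  induction rows with
  | nil =>
      intro _ _ h0
      have hg : g k = (0, 0) := h0 (by simp)
      refine ⟨by simp [pvUpd], ?_, by simp [pvUpd]⟩
      intro p hp'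
      simp only [pvUpd, List.mem_singleton] at hp'
      subst hp'
      simp [hg]
  | cons r rest ih =>
      intro hp hv h0
      by_cases hkr : k = r.1
      · -- overwrite the matching row in place
        have hrest : ∀ p ∈ rest, p.1 ≠ k := by
          intro p hpmem
          have := (List.pairwise_cons.mp hp).1 p hpmem
          exact fun h => by rw [h, hkr] at this; exact lt_irrefl _ this
        refine ⟨?_, ?_, ?_⟩
        · simp only [pvUpd, if_pos hkr]
          refine List.pairwise_cons.mpr ⟨?_, (List.pairwise_cons.mp hp).2⟩
          intro p hpmem
          simpa [hkr] using (List.pairwise_cons.mp hp).1 p hpmem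
        · intro p hpmem
          simp only [pvUpd, if_pos hkr, List.mem_cons] at hpmem
          rcases hpmem with h | h
          · have hr2 : r.2 = g r.1 := hv r (by simp)
            rw [h]
            simp [hkr, hr2]
          · have hne := hrest p h
            simp [hne, hv p (List.mem_cons_of_mem _ h)]
        · intro j
          simp only [pvUpd, if_pos hkr, List.map_cons, List.mem_cons]
          constructor
          · rintro (h | h)
            · exact Or.inl h
            · exact Or.inr (Or.inr h)
          · rintro (h | h | h)
            · exact Or.inl h
            · exact Or.inl (h.trans hkr.symm)
            · exact Or.inr h
      · by_cases hlt : k < r.1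
        · -- insert a fresh row in front
          have hnot : k ∉ (r :: rest).map Prod.fst := by
            intro hmem
            simp only [List.map_cons, List.mem_cons] at hmem
            rcases hmem with h | h
            · exact hkr h
            · obtain ⟨p, hpmem, hpk⟩ := List.mem_map.mp h
              have := (List.pairwise_cons.mp hp).1 p hpmem
              rw [hpk] at this
              exact absurd (hlt.trans this) (lt_irrefl k)
          have hg : g k = (0, 0) := h0 hnot
          refine ⟨?_, ?_, ?_⟩
          · simp only [pvUpd, if_neg hkr, if_pos hlt]
            refine List.pairwise_cons.mpr ⟨?_, hp⟩
            intro p hpmem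
            simp only [List.mem_cons] at hpmem
            rcases hpmem with h | h
            · rw [h]; exact hlt
            · exact hlt.trans ((List.pairwise_cons.mp hp).1 p h)
          · intro p hpmem
            simp only [pvUpd, if_neg hkr, if_pos hlt, List.mem_cons] at hpmem
            rcases hpmem with h | h | h
            · rw [h]; simp [hg]
            · have hne : r.1 ≠ k := fun h' => hkr h'.symm
              rw [h]
              simp [hne, hv r (by simp)]
            · have hne : p.1 ≠ k := by
                intro h'
                exact hnot (by
                  simp only [List.map_cons, List.mem_cons]
                  exact Or.inr (h' ▸ List.mem_map.mpr ⟨p, h, rfl⟩))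
              simp [hne, hv p (List.mem_cons_of_mem _ h)]
          · intro j
            simp only [pvUpd, if_neg hkr, if_pos hlt, List.map_cons, List.mem_cons]
        · -- walk past r and recurse
          have hgt : r.1 < k := by
            rcases lt_trichotomy k r.1 with h | h | h
            · exact absurd h hlt
            · exact absurd h hkr
            · exact h
          have ih' := ih (List.pairwise_cons.mp hp).2
            (fun p hpmem => hv p (List.mem_cons_of_mem _ hpmem))
            (fun hm => h0 (by
              intro hmem
              simp only [List.map_cons, List.mem_cons] at hmem
              rcases hmem with h | h
              · exact hkr h
              · exact hm h))
          refine ⟨?_, ?_, ?_⟩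
          · simp only [pvUpd, if_neg hkr, if_neg hlt]
            refine List.pairwise_cons.mpr ⟨?_, ih'.1⟩
            intro p hpmem
            have hmem : p.1 ∈ (pvUpd rest k tag v).map Prod.fst := List.mem_map.mpr ⟨p, hpmem, rfl⟩
            rcases (ih'.2.2 p.1).mp hmem with h | h
            · rw [h]; exact hgt
            · obtain ⟨q, hq, hqk⟩ := List.mem_map.mp h
              have := (List.pairwise_cons.mp hp).1 q hq
              rw [hqk] at this
              exact this
          · intro p hpmem
            simp only [pvUpd, if_neg hkr, if_neg hlt, List.mem_cons] at hpmem
            rcases hpmem with h | h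
            · have hne : r.1 ≠ k := ne_of_lt hgt
              rw [h]
              simp [hne, hv r (by simp)]
            · exact ih'.2.1 p h
          · intro j
            simp only [pvUpd, if_neg hkr, if_neg hlt, List.map_cons, List.mem_cons]
            rw [ih'.2.2 j]
            tauto

-- After the files pass: rows sorted, slot 0 = last file value, slot 1 = 0, keys = file keys.
theorem pv_phase1 (files : List (String × Int)) :
    let rows := files.foldl (fun rows p => pvUpd rows p.1 0 p.2) []
    rows.Pairwise (fun a b => a.1 < b.1) ∧
    (∀ p ∈ rows, p.2 = (pvLastF files p.1, 0)) ∧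
    (∀ j, j ∈ rows.map Prod.fst ↔ j ∈ files.map Prod.fst) := by
  induction files using List.reverseRecOn with
  | nil => exact ⟨List.Pairwise.nil, by simp, by simp⟩
  | append_singleton fs p ih =>
      rcases p with ⟨k, v⟩
      simp only [List.foldl_append, List.foldl_cons, List.foldl_nil]
      obtain ⟨hp, hv, hk⟩ := ih
      have h0 : k ∉ (fs.foldl (fun rows p => pvUpd rows p.1 0 p.2) []).map Prod.fst →
          (fun j => ((pvLastF fs j, 0) : Int × Int)) k = (0, 0) := by
        intro hm
        have : k ∉ fs.map Prod.fst := fun h => hm ((hk k).mpr h)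
        simp [pvLastF_of_not_mem fs k this]
      obtain ⟨hp', hv', hk'⟩ := pvUpd_inv k 0 v (fun j => (pvLastF fs j, 0)) _ hp hv h0
      refine ⟨hp', ?_, ?_⟩
      · intro q hq
        have := hv' q hq
        by_cases hqk : q.1 = k
        · simp only [hqk] at this ⊢
          rw [this, pvLastF_append]
          simp
        · simp only [if_neg hqk] at this
          rw [this, pvLastF_append, if_neg (fun h => hqk h.symm)]
      · intro j
        rw [hk' j, hk j]
        simp [eq_comm, or_comm]

-- After the shapes pass: rows sorted, slots = last file / last shape value, keys = all keys.
theorem pv_phase2 (files shapes : List (String × Int)) :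
    let rows := shapes.foldl (fun rows p => pvUpd rows p.1 1 p.2)
      (files.foldl (fun rows p => pvUpd rows p.1 0 p.2) [])
    rows.Pairwise (fun a b => a.1 < b.1) ∧
    (∀ p ∈ rows, p.2 = (pvLastF files p.1, pvLastF shapes p.1)) ∧
    (∀ j, j ∈ rows.map Prod.fst ↔ j ∈ files.map Prod.fst ∨ j ∈ shapes.map Prod.fst) := by
  induction shapes using List.reverseRecOn with
  | nil =>
      obtain ⟨hp, hv, hk⟩ := pv_phase1 files
      exact ⟨hp, fun p h => by simpa [pvLastF] using hv p h, fun j => by simp [hk j]⟩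
  | append_singleton ss p ih =>
      rcases p with ⟨k, v⟩
      simp only [List.foldl_append, List.foldl_cons, List.foldl_nil] at ih ⊢
      obtain ⟨hp, hv, hk⟩ := ih
      have h0 : k ∉ (ss.foldl (fun rows p => pvUpd rows p.1 1 p.2)
            (files.foldl (fun rows p => pvUpd rows p.1 0 p.2) [])).map Prod.fst →
          (fun j => ((pvLastF files j, pvLastF ss j) : Int × Int)) k = (0, 0) := by
        intro hm
        have hnot : ¬(k ∈ files.map Prod.fst ∨ k ∈ ss.map Prod.fst) :=
          fun h => hm ((hk k).mpr h)
        rcases not_or.mp hnot with ⟨h1, h2⟩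
        simp [pvLastF_of_not_mem files k h1, pvLastF_of_not_mem ss k h2]
      obtain ⟨hp', hv', hk'⟩ := pvUpd_inv k 1 v (fun j => (pvLastF files j, pvLastF ss j)) _ hp hv h0
      refine ⟨hp', ?_, ?_⟩
      · intro q hq
        have := hv' q hq
        by_cases hqk : q.1 = k
        · simp only [hqk] at this ⊢
          rw [this, pvLastF_append]
          simp
        · simp only [if_neg hqk] at this
          rw [this, pvLastF_append, if_neg (fun h => hqk h.symm)]
      · intro j
        rw [hk' j, hk j]
        constructor
        · rintro (h | h | h)
          · exact Or.inr (by simp [h])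
          · exact Or.inl h
          · exact Or.inr (by simp [h])
        · rintro (h | h)
          · exact Or.inr (Or.inl h)
          · simp only [List.map_append, List.mem_append] at h
            rcases h with h | h
            · exact Or.inr (Or.inr h)
            · simp only [List.map_cons, List.map_nil, List.mem_singleton] at h
              exact Or.inl h

-- A list whose rows are determined by their keys is the map over its key list.
theorem pv_eq_map_fst (l : List (String × Int × Int)) (e : String → String × Int × Int)
    (h : ∀ p ∈ l, p = e p.1) : l = (l.map Prod.fst).map e := by
  induction l with
  | nil => rfl
  | cons p t ih =>
      simp only [List.map_cons]
      rw [← h p (by simp), ← ih (fun q hq => h q (List.mem_cons_of_mem _ hq))]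

-- ===== VERDICT (by name: the statement is the Claim_ definition above) =====
theorem merge_annotator_rows_py_spec : Claim_equal_merge_annotator_rows_py := by
  intro files shapes _
  simp only [Spec_merge_annotator_rows_py, merge_annotator_rows_py, merge_annotator_rows_py_alt]
  obtain ⟨hp2, hv2, hk2⟩ := pv_phase2 files shapes
  set rows := shapes.foldl (fun rows p => pvUpd rows p.1 1 p.2)
      (files.foldl (fun rows p => pvUpd rows p.1 0 p.2) []) with hrows
  set KA := PySem.List.sorted (PySem.Set.union
      (PySem.Set.ofList (files.foldl (fun d p => d.insert p.1 p.2) (PySem.Dict.empty : PySem.Dict String Int)).keys)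
      (shapes.foldl (fun d p => d.insert p.1 p.2) (PySem.Dict.empty : PySem.Dict String Int)).keys)
      (fun x => x) false with hKA
  -- the two key lists are equal: same members, both nodup, both ≤-sorted
  have hKAmem : ∀ j, j ∈ KA ↔ j ∈ files.map Prod.fst ∨ j ∈ shapes.map Prod.fst := by
    intro j
    rw [hKA, PySem.List.mem_sorted, PySem.Set.mem_union, PySem.Set.mem_ofList]
    simp [PySem.Dict.keys_foldl_insert_key, PySem.Set.update_empty]
  have hKAnodup : KA.Nodup := by
    rw [hKA]
    exact (PySem.List.sorted_perm _ _ _).nodup_iff.mpr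
      (PySem.Set.nodup_union _ _ (PySem.Set.nodup_ofList _))
  have hKAsorted : KA.Pairwise (· ≤ ·) := by
    rw [hKA]; exact PySem.List.sorted_pairwise _ _
  have hKBlt : (rows.map Prod.fst).Pairwise (· < ·) := List.pairwise_map.mpr hp2
  have hKBnodup : (rows.map Prod.fst).Nodup := hKBlt.imp ne_of_lt
  have hkeys : KA = rows.map Prod.fst := by
    have hperm : KA.Perm (rows.map Prod.fst) := by
      rw [List.perm_ext_iff_of_nodup hKAnodup hKBnodup]
      intro j
      rw [hKAmem j, hk2 j]
    exact PySem.List.eq_of_perm_of_pairwise_le_of_injective (fun x => x) (fun a b h => h) hperm hKAsorted (hKBlt.imp le_of_lt)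
  -- both sides are that key list mapped through k ↦ (k, lastF files k, lastF shapes k)
  have hB : rows = (rows.map Prod.fst).map
      (fun k => (k, pvLastF files k, pvLastF shapes k)) :=
    pv_eq_map_fst rows _ (fun p hp => by
      have := hv2 p hp
      exact Prod.ext rfl (by rw [this]))
  rw [hkeys]
  conv_rhs => rw [hB]
  apply List.map_congr_left
  intro k _
  rw [pv_getD_empty_eq_lastF files k, pv_getD_empty_eq_lastF shapes k]
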